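-- pv_equiv track=rewrite | github.com/Tytan1996/Kryptologia | zadanie1/zad1.py | przeksztalcenie
-- ===== SOURCE A (Python) =====
-- def przeksztalcenie(tekst,tekst2):
--     dlugoscTekstu=range(len(tekst))
--     table=""
--     k=0
--     for i in dlugoscTekstu:
--         if i%5==0 and i!=0 and i%35 !=0:
--             k+=1
--             tekst2=tekst2+" "
--         if i%35==0 and i!=0:
--             k+=1
--             tekst2=tekst2+'\n'
--         tekst2=tekst2+tekst[i]
--     return tekst2
-- ===== SOURCE B (Python) =====
-- def przeksztalcenie(tekst, tekst2):
--     if tekst == "":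
--         return tekst2
--     wynik = tekst2 + tekst[:5]
--     rest = tekst[5:]
--     j = 1
--     while rest:
--         wynik = wynik + ("\n" if j % 7 == 0 else " ") + rest[:5]
--         rest = rest[5:]
--         j = j + 1
--     return wynik
-- ===== Notes on version B (the rewrite author's own statement) =====
-- stated objective: alternative
-- what changed: B replaces A's per-character loop (testing i%5 and i%35 at every character) by a pass over successive 5-character slices: it seeds the result with tekst2 plus the first slice and then appends one separator (newline when the chunk index j satisfies j%7==0, else a space) plus one slice per iteration.
import Mathlib
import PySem

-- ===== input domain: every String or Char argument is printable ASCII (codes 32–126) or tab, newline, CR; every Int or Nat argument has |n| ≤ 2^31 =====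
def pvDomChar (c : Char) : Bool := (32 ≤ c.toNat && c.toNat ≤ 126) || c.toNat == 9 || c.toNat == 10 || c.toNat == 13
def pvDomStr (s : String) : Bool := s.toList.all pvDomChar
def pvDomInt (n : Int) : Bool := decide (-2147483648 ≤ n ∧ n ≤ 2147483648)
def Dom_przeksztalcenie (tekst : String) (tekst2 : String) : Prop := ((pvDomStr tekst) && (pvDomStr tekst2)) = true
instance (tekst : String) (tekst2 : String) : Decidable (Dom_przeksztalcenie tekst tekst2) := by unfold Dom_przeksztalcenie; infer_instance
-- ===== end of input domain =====

-- B replaces A's per-character modulo loop by a pass over 5-character chunks (simpler decomposition, same return value).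

-- ===== PORT A =====
-- A's loop body: two sequential ifs appending a separator, then tekst[i]; the dead
-- locals `table` and `k` of A are dropped (they never affect the result).
-- String concatenation is carried on List Char (String.append is kernel-opaque); wrapped back at the end.
def pvStepA (cs : List Char) (acc : List Char) (i : Int) : List Char :=
  let acc := if PySem.Int.mod i 5 = 0 ∧ i ≠ 0 ∧ PySem.Int.mod i 35 ≠ 0 then acc ++ [' '] else acc
  let acc := if PySem.Int.mod i 35 = 0 ∧ i ≠ 0 then acc ++ ['\n'] else acc
  acc ++ [PySem.List.pyGetD cs i ' ']   -- tekst[i]; i is always in range, default never read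

def przeksztalcenie (tekst : String) (tekst2 : String) : String :=
  String.ofList ((PySem.List.pyRange 0 (PySem.Str.len tekst) 1).foldl (pvStepA tekst.toList) tekst2.toList)

-- ===== PORT B =====
-- the while loop of Source B: rest is the unprocessed tail, j counts chunks; rest[:5] / rest[5:] are take/drop
def pvBLoop (rest : List Char) (j : Nat) (wynik : List Char) : List Char :=
  if h : rest = [] then wynik   -- h is used by the decreasing_by proof
  else pvBLoop (rest.drop 5) (j + 1)
         (wynik ++ (if j % 7 = 0 then ['\n'] else [' ']) ++ rest.take 5)
termination_by rest.length
decreasing_by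
  cases rest with
  | nil => exact absurd rfl h
  | cons c t => simp [List.length_drop]

def przeksztalcenie_alt (tekst : String) (tekst2 : String) : String :=
  if tekst.toList = [] then tekst2
  else String.ofList (pvBLoop (tekst.toList.drop 5) 1 (tekst2.toList ++ tekst.toList.take 5))

-- ===== PRECONDITION & SPEC =====
def Spec_przeksztalcenie (tekst : String) (tekst2 : String) (out : String) : Prop := out = przeksztalcenie_alt tekst tekst2
instance (tekst : String) (tekst2 : String) (out : String) : Decidable (Spec_przeksztalcenie tekst tekst2 out) := by unfold Spec_przeksztalcenie; infer_instance

-- ===== CLAIM (what is proved, stated in full; the proofs are below) =====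
def Claim_equal_przeksztalcenie : Prop := ∀ (tekst : String) (tekst2 : String), Dom_przeksztalcenie tekst tekst2 → Spec_przeksztalcenie tekst tekst2 (przeksztalcenie tekst tekst2)

-- ===== LEMMAS AND PROOFS =====

-- the separator A emits before character index i
def pvSep (i : Nat) : List Char :=
  if i % 5 = 0 ∧ i ≠ 0 then (if i % 35 = 0 then ['\n'] else [' ']) else []

-- A's loop, re-expressed as structural recursion on the remaining characters with index i
def pvAGo (cs : List Char) (i : Nat) (acc : List Char) : List Char :=
  match cs with
  | [] => acc
  | c :: t => pvAGo t (i + 1) (acc ++ pvSep i ++ [c])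

lemma pvBLoop_nil (j : Nat) (acc : List Char) : pvBLoop [] j acc = acc := by
  rw [pvBLoop]; simp

lemma pvStepA_eq (pre cs : List Char) (c : Char) (acc : List Char) :
    pvStepA (pre ++ c :: cs) acc (pre.length : Int) = acc ++ pvSep pre.length ++ [c] := by
  have hget : PySem.List.pyGetD (pre ++ c :: cs) (pre.length : Int) ' ' = c := by
    simp [PySem.List.pyGetD_natCast, List.getD]
  have d5 : ((5 : Int) ∣ (pre.length : Int)) ↔ pre.length % 5 = 0 := by omega
  have d35 : ((35 : Int) ∣ (pre.length : Int)) ↔ pre.length % 35 = 0 := by omega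
  unfold pvStepA pvSep
  rw [hget]
  by_cases h0 : pre.length = 0
  · simp [h0]
  · by_cases hm35 : pre.length % 35 = 0
    · have hm5 : pre.length % 5 = 0 := by omega
      simp [d5, d35, h0, hm35, hm5]
    · by_cases hm5 : pre.length % 5 = 0 <;> simp [d5, d35, h0, hm35, hm5]

lemma pvFold_eq_aGo (cs : List Char) : ∀ (pre acc : List Char),
    (PySem.List.pyRange (pre.length : Int) ((pre.length : Int) + (cs.length : Int)) 1).foldl
      (pvStepA (pre ++ cs)) acc = pvAGo cs pre.length acc := by
  induction cs with
  | nil => intro pre acc; simp [PySem.List.pyRange_one_eq_nil, pvAGo]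
  | cons c t ih =>
    intro pre acc
    rw [PySem.List.pyRange_one_cons (by push_cast [List.length_cons]; omega), List.foldl_cons,
      pvStepA_eq pre t c acc, pvAGo]
    have h := ih (pre ++ [c]) (acc ++ pvSep pre.length ++ [c])
    simp only [List.length_append, List.append_assoc,
      List.singleton_append, List.length_cons, Nat.cast_add, Nat.cast_one] at h ⊢
    rw [show (pre.length : Int) + ((t.length : Int) + 1) = ((pre.length : Int) + 1) + (t.length : Int) by ring]
    exact h

lemma pvSep_not_mul5 (i : Nat) (h : i % 5 ≠ 0) : pvSep i = [] := by
  simp [pvSep, h]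

lemma pvSep_mul5 (j : Nat) (hj : 1 ≤ j) :
    pvSep (5 * j) = (if j % 7 = 0 then ['\n'] else [' ']) := by
  unfold pvSep
  have h5 : 5 * j % 5 = 0 := by omega
  have hne : 5 * j ≠ 0 := by omega
  have h35 : 5 * j % 35 = 0 ↔ j % 7 = 0 := by omega
  by_cases h7 : j % 7 = 0 <;> simp [h5, hne, h35, h7]

-- A's loop swallows a full 5-character chunk in one conceptual step
lemma pvAGo_five (c1 c2 c3 c4 c5 : Char) (t : List Char) (i : Nat) (acc : List Char)
    (h5 : i % 5 = 0) :
    pvAGo (c1 :: c2 :: c3 :: c4 :: c5 :: t) i acc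
      = pvAGo t (i + 5) (acc ++ pvSep i ++ [c1, c2, c3, c4, c5]) := by
  simp only [pvAGo, pvSep_not_mul5 (i + 1) (by omega), pvSep_not_mul5 (i + 1 + 1) (by omega),
    pvSep_not_mul5 (i + 1 + 1 + 1) (by omega), pvSep_not_mul5 (i + 1 + 1 + 1 + 1) (by omega),
    List.append_nil]
  rw [show i + 1 + 1 + 1 + 1 + 1 = i + 5 by omega]
  simp [List.append_assoc]

-- core: A's character loop from index 5*j equals B's chunk loop at chunk j (j ≥ 1)
lemma pvAGo_eq_bLoop (fuel : Nat) : ∀ (rest : List Char) (j : Nat) (acc : List Char),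
    rest.length ≤ fuel → 1 ≤ j → pvAGo rest (5 * j) acc = pvBLoop rest j acc := by
  induction fuel with
  | zero =>
    intro rest j acc hlen _
    have : rest = [] := List.eq_nil_of_length_eq_zero (Nat.le_zero.mp hlen)
    subst this; simp [pvAGo, pvBLoop_nil]
  | succ n ih =>
    intro rest j acc hlen hj
    match rest with
    | [] => simp [pvAGo, pvBLoop_nil]
    | c1 :: t =>
      rw [pvBLoop]
      simp only [reduceCtorEq, dite_false]
      have hsep := pvSep_mul5 j hj
      match t with
      | [] => simp [pvAGo, hsep, pvBLoop_nil]
      | c2 :: [] => simp [pvAGo, hsep, pvBLoop_nil, pvSep_not_mul5 (5 * j + 1) (by omega)]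
      | c2 :: c3 :: [] =>
        simp [pvAGo, hsep, pvBLoop_nil, pvSep_not_mul5 (5 * j + 1) (by omega),
          pvSep_not_mul5 (5 * j + 1 + 1) (by omega)]
      | c2 :: c3 :: c4 :: [] =>
        simp [pvAGo, hsep, pvBLoop_nil, pvSep_not_mul5 (5 * j + 1) (by omega),
          pvSep_not_mul5 (5 * j + 1 + 1) (by omega), pvSep_not_mul5 (5 * j + 1 + 1 + 1) (by omega)]
      | c2 :: c3 :: c4 :: c5 :: t4 =>
        rw [pvAGo_five c1 c2 c3 c4 c5 t4 (5 * j) acc (by omega),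
          show 5 * j + 5 = 5 * (j + 1) by ring,
          ih t4 (j + 1) _ (by simp at hlen ⊢; omega) (by omega)]
        simp [hsep]

-- ===== VERDICT (by name: the statement is the Claim_ definition above) =====
theorem przeksztalcenie_spec : Claim_equal_przeksztalcenie := by
  intro tekst tekst2 _
  unfold Spec_przeksztalcenie przeksztalcenie przeksztalcenie_alt
  have hfold := pvFold_eq_aGo tekst.toList [] tekst2.toList
  simp only [List.length_nil, List.nil_append, Nat.cast_zero, zero_add] at hfold
  have hlen : PySem.Str.len tekst = (tekst.toList.length : Int) := by
    simp [PySem.Str.len_eq]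
  rw [hlen, hfold]
  match h : tekst.toList with
  | [] => simp [pvAGo]
  | c1 :: t =>
    simp only [reduceCtorEq, if_false]
    match t with
    | [] => simp [pvAGo, pvSep, pvBLoop_nil]
    | c2 :: [] => simp [pvAGo, pvSep, pvBLoop_nil]
    | c2 :: c3 :: [] => simp [pvAGo, pvSep, pvBLoop_nil]
    | c2 :: c3 :: c4 :: [] => simp [pvAGo, pvSep, pvBLoop_nil]
    | c2 :: c3 :: c4 :: c5 :: t4 =>
      rw [pvAGo_five c1 c2 c3 c4 c5 t4 0 tekst2.toList (by omega),
        show 0 + 5 = 5 * 1 from rfl,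
        pvAGo_eq_bLoop t4.length t4 1 _ le_rfl le_rfl]
      simp [pvSep]
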